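-- pv_equiv track=rewrite | github.com/ASSERT-KTH/Mokav | experiments/pynguin/c4b/return-lst/generated_tests/src_682/2/src_682.py | func
-- ===== SOURCE A (Python) =====
-- def func(*args):
-- 	ret_values = []
--
-- 	s = args[0]
-- 	n = len(s)
-- 	cnt = 0
-- 	flag = 1
-- 	light = [1 for j in range(n)]
-- 	i = 0
-- 	while (i < n):
-- 	    if ((i < (n - 1)) and (s[i] == 'V') and (s[(i + 1)] == 'K')):
-- 	        cnt += 1
-- 	        light[i] = light[(i + 1)] = 0
-- 	        i += 2
-- 	    else:
-- 	        i += 1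
-- 	i = 0
-- 	while ((i < n) and flag):
-- 	    if ((i < (n - 1)) and (s[i] == 'V') and (s[(i + 1)] == 'V') and light[i] and light[(i + 1)]):
-- 	        cnt += 1
-- 	        flag = 0
-- 	    elif ((i < (n - 1)) and (s[i] == 'K') and (s[(i + 1)] == 'K') and light[i] and light[(i + 1)]):
-- 	        cnt += 1
-- 	        flag = 0
-- 	    else:
-- 	        i += 1
-- 	ret_values.append(cnt)
--
-- 	return ret_values
-- ===== SOURCE B (Python) =====
-- def func(*args):
--     s = args[0]
--     n = len(s)
--
--     def count_vk(t):
--         return sum(1 for j in range(len(t) - 1) if t[j] == 'V' and t[j + 1] == 'K')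
--
--     best = count_vk(s)
--     for i in range(n):
--         if s[i] == 'V' or s[i] == 'K':
--             t = s[:i] + ('K' if s[i] == 'V' else 'V') + s[i + 1:]
--             c = count_vk(t)
--             if c > best:
--                 best = c
--     return [best]
-- ===== Notes on version B (the rewrite author's own statement) =====
-- stated objective: alternative
-- what changed: A's greedy scan with a mutable light array plus a flag-controlled second pass is replaced by direct brute-force maximization: count 'VK' occurrences in s and in every string obtained by flipping one 'V'/'K' character to the other, and return the maximum (trades A's linear time for quadratic directness).
import Mathlib
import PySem

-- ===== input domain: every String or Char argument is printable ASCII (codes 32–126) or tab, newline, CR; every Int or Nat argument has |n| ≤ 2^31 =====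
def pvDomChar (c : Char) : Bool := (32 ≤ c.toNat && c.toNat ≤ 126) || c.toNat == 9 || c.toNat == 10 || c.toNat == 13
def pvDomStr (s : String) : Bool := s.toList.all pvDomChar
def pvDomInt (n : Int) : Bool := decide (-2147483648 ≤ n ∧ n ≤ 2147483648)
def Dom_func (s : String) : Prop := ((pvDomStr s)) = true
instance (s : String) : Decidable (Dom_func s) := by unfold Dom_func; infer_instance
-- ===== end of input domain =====

-- B replaces A's greedy scan (mutable `light` array + flag-controlled second loop) by
-- brute-force maximization: count 'VK' in s and in every single-character V<->K flip of s,
-- return the maximum.  Objective: alternative (direct, no mutable state; O(n^2) vs O(n)).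

-- ===== PORT A =====
-- first while loop: greedy scan counting 'VK' pairs and clearing `light` at their positions.
-- All `light[...]` accesses/updates in the Python are on in-range indices and `light` holds
-- only 0/1 ints, so List.set / List.getD (truthiness = ≠ 0) transcribe them exactly.
def funcLoop1 (cs : List Char) : Nat → Int → Int → List Int → Int × List Int
  | 0, _, cnt, light => (cnt, light)
  | fuel+1, i, cnt, light =>
    if i < (cs.length : Int) then
      if i < (cs.length : Int) - 1 ∧ PySem.List.pyGet? cs i = some 'V' ∧
          PySem.List.pyGet? cs (i+1) = some 'K' then
        funcLoop1 cs fuel (i+2) (cnt+1) ((light.set i.toNat 0).set (i+1).toNat 0)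
      else
        funcLoop1 cs fuel (i+1) cnt light
    else (cnt, light)

-- second while loop: look for an unlit 'VV' or 'KK' pair (flag stops the scan after one hit).
def funcLoop2 (cs : List Char) (light : List Int) : Nat → Int → Int → Bool → Int
  | 0, _, cnt, _ => cnt
  | fuel+1, i, cnt, flag =>
    if i < (cs.length : Int) ∧ flag = true then
      if i < (cs.length : Int) - 1 ∧ PySem.List.pyGet? cs i = some 'V' ∧
          PySem.List.pyGet? cs (i+1) = some 'V' ∧
          light.getD i.toNat 0 ≠ 0 ∧ light.getD (i+1).toNat 0 ≠ 0 then
        funcLoop2 cs light fuel i (cnt+1) false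
      else if i < (cs.length : Int) - 1 ∧ PySem.List.pyGet? cs i = some 'K' ∧
          PySem.List.pyGet? cs (i+1) = some 'K' ∧
          light.getD i.toNat 0 ≠ 0 ∧ light.getD (i+1).toNat 0 ≠ 0 then
        funcLoop2 cs light fuel i (cnt+1) false
      else
        funcLoop2 cs light fuel (i+1) cnt flag
    else cnt

-- fuel: the first loop runs at most n iterations (i grows by ≥ 1), the second at most n+1
-- (i grows by 1 except in the final flag-clearing iteration).
def func (s : String) : List Int :=
  let cs := s.toList
  let n := cs.length
  let r := funcLoop1 cs n 0 0 (List.replicate n 1)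
  let cnt := funcLoop2 cs r.2 (n+1) 0 r.1 true
  [cnt]

-- ===== PORT B =====
-- count_vk(t) of Source B: sum over j in range(len(t)-1) of [t[j]=='V' and t[j+1]=='K'];
-- all indices are in range, so List.getD transcribes the indexing exactly.
def bCount (cs : List Char) : Int :=
  (((List.range (cs.length - 1)).countP
      (fun j => cs.getD j ' ' == 'V' && cs.getD (j+1) ' ' == 'K') : Nat) : Int)

-- count_vk(s[:i] + ('K' if s[i]=='V' else 'V') + s[i+1:]) of Source B; for 0 ≤ i < len(s) the
-- slice concatenation is exactly take/drop.
def bFlipCount (cs : List Char) (i : Nat) : Int :=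
  bCount (cs.take i ++ [if cs.getD i ' ' == 'V' then 'K' else 'V'] ++ cs.drop (i+1))

-- body of Source B's for-loop: update `best` when s[i] is 'V' or 'K' and the flipped count beats it.
def bStep (cs : List Char) (best : Int) (i : Nat) : Int :=
  if cs.getD i ' ' == 'V' || cs.getD i ' ' == 'K' then
    (if bFlipCount cs i > best then bFlipCount cs i else best)
  else best

def func_alt (s : String) : List Int :=
  let cs := s.toList
  [(List.range cs.length).foldl (bStep cs) (bCount cs)]

-- ===== PRECONDITION & SPEC =====
def Spec_func (s : String) (out : List Int) : Prop := out = func_alt s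
instance (s : String) (out : List Int) : Decidable (Spec_func s out) := by unfold Spec_func; infer_instance

-- ===== CLAIM (what is proved, stated in full; the proofs are below) =====
def Claim_equal_func : Prop := ∀ (s : String), Dom_func s → Spec_func s (func s)

-- ===== LEMMAS AND PROOFS =====

def occB (cs : List Char) (j : Nat) : Bool :=
  decide (j + 1 < cs.length) && (cs.getD j ' ' == 'V') && (cs.getD (j+1) ' ' == 'K')
def pairedGe (cs : List Char) (i j : Nat) : Bool :=
  (decide (i ≤ j) && occB cs j) || (decide (i + 1 ≤ j) && occB cs (j-1))

theorem occB_succ_false (cs : List Char) (i : Nat) (h : occB cs i = true) :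
    occB cs (i+1) = false := by
  simp only [occB, Bool.and_eq_true, decide_eq_true_eq, beq_iff_eq] at h
  simp only [occB, Bool.and_eq_false_iff]
  left; right
  rw [h.2]; decide

theorem pairedGe_ge (cs : List Char) (i j : Nat) (h : cs.length ≤ i) (hj : j < cs.length) :
    pairedGe cs i j = false := by
  simp only [pairedGe, occB, Bool.or_eq_false_iff, Bool.and_eq_false_iff]
  constructor
  · left; simp; omega
  · left; simp; omega

theorem pairedGe_step1 (cs : List Char) (i j : Nat) (h : occB cs i = false) :
    pairedGe cs i j = pairedGe cs (i+1) j := by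
  rw [Bool.eq_iff_iff]
  simp only [pairedGe, Bool.or_eq_true, Bool.and_eq_true, decide_eq_true_eq]
  constructor
  · rintro (⟨hle, ho⟩ | ⟨hle, ho⟩)
    · rcases Nat.eq_or_lt_of_le hle with e | _
      · rw [← e] at ho; rw [ho] at h; exact absurd h (by simp)
      · exact Or.inl ⟨by omega, ho⟩
    · by_cases e : j = i + 1
      · subst e; simp at ho; rw [ho] at h; exact absurd h (by simp)
      · exact Or.inr ⟨by omega, ho⟩
  · rintro (⟨hle, ho⟩ | ⟨hle, ho⟩)
    · exact Or.inl ⟨by omega, ho⟩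
    · exact Or.inr ⟨by omega, ho⟩

theorem pairedGe_step2 (cs : List Char) (i j : Nat) (h : occB cs i = true) :
    pairedGe cs i j = (pairedGe cs (i+2) j || decide (j = i) || decide (j = i+1)) := by
  have hK := occB_succ_false cs i h
  rw [Bool.eq_iff_iff]
  simp only [pairedGe, Bool.or_eq_true, Bool.and_eq_true, decide_eq_true_eq]
  constructor
  · rintro (⟨hle, ho⟩ | ⟨hle, ho⟩)
    · by_cases e : j = i
      · exact Or.inl (Or.inr e)
      · by_cases e1 : j = i + 1
        · rw [e1] at ho; rw [ho] at hK; exact absurd hK (by simp)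
        · exact Or.inl (Or.inl (Or.inl ⟨by omega, ho⟩))
    · by_cases e1 : j = i + 1
      · exact Or.inr e1
      · by_cases e2 : j = i + 2
        · have : j - 1 = i + 1 := by omega
          rw [this] at ho; rw [ho] at hK; exact absurd hK (by simp)
        · exact Or.inl (Or.inl (Or.inr ⟨by omega, ho⟩))
  · rintro (((⟨hle, ho⟩ | ⟨hle, ho⟩) | e) | e)
    · exact Or.inl ⟨by omega, ho⟩
    · exact Or.inr ⟨by omega, ho⟩
    · subst e; exact Or.inl ⟨le_refl _, h⟩
    · subst e; exact Or.inr ⟨le_refl _, by simpa using h⟩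

theorem getD_eq_getElem' (l : List Int) (j : Nat) (h : j < l.length) : l.getD j 0 = l[j] := by
  rw [List.getD_eq_getElem?_getD, List.getElem?_eq_getElem h, Option.getD_some]

theorem condA_iff (cs : List Char) (i : Nat) :
    ((i:Int) < (cs.length:Int) - 1 ∧ PySem.List.pyGet? cs (i:Int) = some 'V' ∧
      PySem.List.pyGet? cs ((i:Int)+1) = some 'K') ↔ occB cs i = true := by
  have h1 : (i:Int)+1 = ((i+1:Nat):Int) := by push_cast; ring
  rw [h1, PySem.List.pyGet?_natCast, PySem.List.pyGet?_natCast]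
  simp only [occB, Bool.and_eq_true, decide_eq_true_eq, beq_iff_eq]
  constructor
  · rintro ⟨ha, hb, hc⟩
    have hi1 : i + 1 < cs.length := by omega
    have hi : i < cs.length := by omega
    rw [List.getElem?_eq_getElem hi, Option.some_inj] at hb
    rw [List.getElem?_eq_getElem hi1, Option.some_inj] at hc
    refine ⟨⟨hi1, ?_⟩, ?_⟩
    · rw [List.getD_eq_getElem?_getD, List.getElem?_eq_getElem hi]; exact hb
    · rw [List.getD_eq_getElem?_getD, List.getElem?_eq_getElem hi1]; exact hc
  · rintro ⟨⟨hi1, hb⟩, hc⟩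
    have hi : i < cs.length := by omega
    rw [List.getD_eq_getElem?_getD, List.getElem?_eq_getElem hi] at hb
    rw [List.getD_eq_getElem?_getD, List.getElem?_eq_getElem hi1] at hc
    refine ⟨by omega, ?_, ?_⟩
    · rw [List.getElem?_eq_getElem hi]; exact congrArg some hb
    · rw [List.getElem?_eq_getElem hi1]; exact congrArg some hc

theorem getD_set_pair (light : List Int) (i j : Nat) (h : i + 1 < light.length) :
    ((light.set i 0).set (i+1) 0).getD j 0 = if j = i ∨ j = i+1 then 0 else light.getD j 0 := by
  by_cases e1 : j = i + 1
  · subst e1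
    rw [getD_eq_getElem' _ _ (by simpa using h), List.getElem_set_self]
    simp
  · by_cases e0 : j = i
    · subst e0
      rw [List.getD_eq_getElem?_getD, List.getElem?_set_ne (by omega),
        List.getElem?_set_self', List.getElem?_eq_getElem (by omega : j < light.length)]
      simp
    · rw [List.getD_eq_getElem?_getD, List.getElem?_set_ne (by omega),
        List.getElem?_set_ne (by omega), ← List.getD_eq_getElem?_getD]
      simp [e0, e1]

theorem occB_lt (cs : List Char) (i : Nat) (h : occB cs i = true) : i + 1 < cs.length := by
  simp only [occB, Bool.and_eq_true, decide_eq_true_eq] at h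
  exact h.1.1

theorem loop1_spec (cs : List Char) (fuel : Nat) :
    ∀ (i : Nat) (cnt : Int) (light : List Int),
    i ≤ cs.length → cs.length ≤ fuel + i → light.length = cs.length →
    (funcLoop1 cs fuel (i : Int) cnt light).1
        = cnt + ((List.range' i (cs.length - i)).countP (occB cs)) ∧
    (∀ j, j < cs.length →
      (funcLoop1 cs fuel (i : Int) cnt light).2.getD j 0
        = if pairedGe cs i j then 0 else light.getD j 0) := by
  induction fuel with
  | zero =>
    intro i cnt light hi hf hl
    have hieq : i = cs.length := by omega
    subst hieq
    refine ⟨by simp [funcLoop1], ?_⟩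
    intro j hj
    rw [pairedGe_ge cs _ j (le_refl _) hj]
    simp [funcLoop1]
  | succ fuel ih =>
    intro i cnt light hi hf hl
    by_cases hin : i < cs.length
    · rw [funcLoop1, if_pos (by exact_mod_cast hin)]
      by_cases hc : occB cs i = true
      · rw [if_pos ((condA_iff cs i).mpr hc)]
        have hi1 : i + 1 < cs.length := occB_lt cs i hc
        have e2 : (i:Int) + 2 = ((i+2 : Nat) : Int) := by push_cast; ring
        have e1 : (i:Int) + 1 = ((i+1 : Nat) : Int) := by push_cast; ring
        rw [e2, e1, Int.toNat_natCast, Int.toNat_natCast]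
        obtain ⟨ihc, ihl⟩ := ih (i+2) (cnt+1) ((light.set i 0).set (i+1) 0)
          (by omega) (by omega) (by simp [hl])
        constructor
        · rw [ihc]
          have hr : List.range' i (cs.length - i)
              = i :: (i+1) :: List.range' (i+2) (cs.length - (i+2)) := by
            have h2 : cs.length - i = (cs.length - (i+2)) + 1 + 1 := by omega
            rw [h2, List.range'_succ, List.range'_succ]
          rw [hr]
          simp [hc, occB_succ_false cs i hc]
          ring
        · intro j hj
          rw [ihl j hj, getD_set_pair light i j (by omega), pairedGe_step2 cs i j hc]
          by_cases p2 : pairedGe cs (i+2) j = true <;> by_cases a : j = i <;>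
            by_cases b : j = i+1 <;> simp [p2, a, b]
      · rw [if_neg (fun hcc => hc ((condA_iff cs i).mp hcc))]
        have e1 : (i:Int) + 1 = ((i+1 : Nat) : Int) := by push_cast; ring
        rw [e1]
        obtain ⟨ihc, ihl⟩ := ih (i+1) cnt light (by omega) (by omega) hl
        constructor
        · rw [ihc]
          have hr : List.range' i (cs.length - i)
              = i :: List.range' (i+1) (cs.length - (i+1)) := by
            have h2 : cs.length - i = (cs.length - (i+1)) + 1 := by omega
            rw [h2, List.range'_succ]
          rw [hr, List.countP_cons]
          simp [hc]
        · intro j hj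
          rw [ihl j hj, pairedGe_step1 cs i j (by simpa using hc)]
    · have hieq : i = cs.length := by omega
      subst hieq
      rw [funcLoop1, if_neg (by exact_mod_cast hin)]
      refine ⟨by simp, ?_⟩
      intro j hj
      rw [pairedGe_ge cs _ j (le_refl _) hj]
      simp

def bonusAt (cs : List Char) (j : Nat) : Bool :=
  decide (j + 1 < cs.length) &&
  ((cs.getD j ' ' == 'V' && cs.getD (j+1) ' ' == 'V') ||
   (cs.getD j ' ' == 'K' && cs.getD (j+1) ' ' == 'K')) &&
  !pairedGe cs 0 j && !pairedGe cs 0 (j+1)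

theorem loop2_false (cs : List Char) (light : List Int) (fuel : Nat) (i cnt : Int) :
    funcLoop2 cs light fuel i cnt false = cnt := by
  cases fuel <;> simp [funcLoop2]

theorem cond2_iff (cs : List Char) (light : List Int)
    (hl : ∀ j, j < cs.length → light.getD j 0 = if pairedGe cs 0 j then 0 else 1)
    (i : Nat) (c : Char) (_hc : c = 'V' ∨ c = 'K') :
    ((i:Int) < (cs.length:Int) - 1 ∧ PySem.List.pyGet? cs (i:Int) = some c ∧
      PySem.List.pyGet? cs ((i:Int)+1) = some c ∧
      light.getD ((i:Int)).toNat 0 ≠ 0 ∧ light.getD ((i:Int)+1).toNat 0 ≠ 0)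
    ↔ (i + 1 < cs.length ∧ cs.getD i ' ' = c ∧ cs.getD (i+1) ' ' = c ∧
        pairedGe cs 0 i = false ∧ pairedGe cs 0 (i+1) = false) := by
  have e1 : (i:Int) + 1 = ((i+1 : Nat) : Int) := by push_cast; ring
  rw [e1, Int.toNat_natCast, Int.toNat_natCast, PySem.List.pyGet?_natCast,
    PySem.List.pyGet?_natCast]
  by_cases hn : i + 1 < cs.length
  · have hi : i < cs.length := by omega
    rw [List.getElem?_eq_getElem hi, List.getElem?_eq_getElem hn,
      hl i hi, hl (i+1) hn,
      List.getD_eq_getElem?_getD, List.getElem?_eq_getElem hi,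
      List.getD_eq_getElem?_getD, List.getElem?_eq_getElem hn]
    constructor
    · rintro ⟨h1, h2, h3, h4, h5⟩
      refine ⟨hn, by simpa using h2, by simpa using h3, ?_, ?_⟩
      · by_cases p : pairedGe cs 0 i = true <;> simp [p] at h4 ⊢
      · by_cases p : pairedGe cs 0 (i+1) = true <;> simp [p] at h5 ⊢
    · rintro ⟨-, h2, h3, h4, h5⟩
      refine ⟨by omega, by simpa using h2, by simpa using h3, by simp [h4], by simp [h5]⟩
  · constructor
    · rintro ⟨h1, -⟩
      exact absurd h1 (by omega)
    · rintro ⟨h1, -⟩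
      exact absurd h1 hn

theorem bonusAt_iff (cs : List Char) (i : Nat) :
    bonusAt cs i = true ↔
      ((i + 1 < cs.length ∧ cs.getD i ' ' = 'V' ∧ cs.getD (i+1) ' ' = 'V' ∧
        pairedGe cs 0 i = false ∧ pairedGe cs 0 (i+1) = false) ∨
       (i + 1 < cs.length ∧ cs.getD i ' ' = 'K' ∧ cs.getD (i+1) ' ' = 'K' ∧
        pairedGe cs 0 i = false ∧ pairedGe cs 0 (i+1) = false)) := by
  simp only [bonusAt, Bool.and_eq_true, Bool.or_eq_true, decide_eq_true_eq, beq_iff_eq,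
    Bool.not_eq_true']
  tauto

theorem loop2_spec (cs : List Char) (light : List Int)
    (hl : ∀ j, j < cs.length → light.getD j 0 = if pairedGe cs 0 j then 0 else 1)
    (fuel : Nat) :
    ∀ (i : Nat) (cnt : Int), i ≤ cs.length → cs.length ≤ fuel + i →
    funcLoop2 cs light fuel (i : Int) cnt true
      = cnt + (if (List.range' i (cs.length - 1 - i)).any (bonusAt cs) then 1 else 0) := by
  induction fuel with
  | zero =>
    intro i cnt hi hf
    have hieq : i = cs.length := by omega
    subst hieq
    have : cs.length - 1 - cs.length = 0 := by omega
    rw [this]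
    simp [funcLoop2]
  | succ fuel ih =>
    intro i cnt hi hf
    by_cases hin : i < cs.length
    · rw [funcLoop2, if_pos ⟨by exact_mod_cast hin, rfl⟩]
      by_cases hb : bonusAt cs i = true
      · have hn1 : i + 1 < cs.length := by
          rcases (bonusAt_iff cs i).mp hb with ⟨h, -⟩ | ⟨h, -⟩ <;> exact h
        have hr : List.range' i (cs.length - 1 - i)
            = i :: List.range' (i+1) (cs.length - 1 - (i+1)) := by
          have h2 : cs.length - 1 - i = (cs.length - 1 - (i+1)) + 1 := by omega
          rw [h2, List.range'_succ]
        rcases (bonusAt_iff cs i).mp hb with hV | hK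
        · rw [if_pos ((cond2_iff cs light hl i 'V' (Or.inl rfl)).mpr hV), loop2_false,
            hr]
          simp [hb]
        · by_cases hVc : ((i:Int) < (cs.length:Int) - 1 ∧
              PySem.List.pyGet? cs (i:Int) = some 'V' ∧
              PySem.List.pyGet? cs ((i:Int)+1) = some 'V' ∧
              light.getD ((i:Int)).toNat 0 ≠ 0 ∧ light.getD ((i:Int)+1).toNat 0 ≠ 0)
          · rw [if_pos hVc, loop2_false, hr]
            simp [hb]
          · rw [if_neg hVc,
              if_pos ((cond2_iff cs light hl i 'K' (Or.inr rfl)).mpr hK), loop2_false, hr]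
            simp [hb]
      · rw [if_neg, if_neg]
        · have e1 : (i:Int) + 1 = ((i+1 : Nat) : Int) := by push_cast; ring
          rw [e1, ih (i+1) cnt (by omega) (by omega)]
          by_cases hn1 : i + 1 < cs.length
          · have hr : List.range' i (cs.length - 1 - i)
                = i :: List.range' (i+1) (cs.length - 1 - (i+1)) := by
              have h2 : cs.length - 1 - i = (cs.length - 1 - (i+1)) + 1 := by omega
              rw [h2, List.range'_succ]
            rw [hr]
            rw [Bool.not_eq_true] at hb
            by_cases hta : (List.range' (i+1) (cs.length - 1 - (i+1))).any (bonusAt cs) = true <;>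
              simp [List.any_cons, hta, hb]
          · have h0 : cs.length - 1 - i = 0 := by omega
            have h1 : cs.length - 1 - (i+1) = 0 := by omega
            rw [h0, h1]
            simp [List.range']
        · intro hcc
          exact hb ((bonusAt_iff cs i).mpr (Or.inr ((cond2_iff cs light hl i 'K' (Or.inr rfl)).mp hcc)))
        · intro hcc
          exact hb ((bonusAt_iff cs i).mpr (Or.inl ((cond2_iff cs light hl i 'V' (Or.inl rfl)).mp hcc)))
    · have hieq : i = cs.length := by omega
      subst hieq
      rw [funcLoop2, if_neg (by omega)]
      have : cs.length - 1 - cs.length = 0 := by omega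
      rw [this]
      simp

theorem count_shrink (cs : List Char) :
    (List.range' 0 cs.length).countP (occB cs)
      = (List.range (cs.length - 1)).countP (occB cs) := by
  rw [← List.range_eq_range']
  cases h : cs.length with
  | zero => simp
  | succ m =>
    rw [List.range_succ, List.countP_append]
    have : occB cs m = false := by
      simp only [occB, Bool.and_eq_false_iff]
      left; left; simp; omega
    simp [this]

-- A's value in closed form: greedy count + possible bonus.
theorem funcA_val (s : String) :
    func s = [(((List.range (s.toList.length - 1)).countP (occB s.toList) : Nat) : Int)
      + (if (List.range (s.toList.length - 1)).any (bonusAt s.toList) then 1 else 0)] := by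
  unfold func
  dsimp only
  obtain ⟨h1, h2⟩ := loop1_spec (s.toList) s.toList.length 0 0
    (List.replicate s.toList.length 1) (Nat.zero_le _) (by omega) (by simp)
  simp only [Nat.cast_zero, Nat.sub_zero] at h1 h2
  have hl : ∀ j, j < s.toList.length →
      (funcLoop1 s.toList s.toList.length 0 0 (List.replicate s.toList.length 1)).2.getD j 0
        = if pairedGe s.toList 0 j then 0 else 1 := by
    intro j hj
    rw [h2 j hj]
    have : (List.replicate s.toList.length (1:Int)).getD j 0 = 1 := by
      rw [getD_eq_getElem' _ _ (by simpa using hj), List.getElem_replicate]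
    rw [this]
  have h3 := loop2_spec s.toList _ hl (s.toList.length + 1) 0
    ((funcLoop1 s.toList s.toList.length 0 0 (List.replicate s.toList.length 1)).1)
    (Nat.zero_le _) (by omega)
  simp only [Nat.cast_zero, Nat.sub_zero, ← List.range_eq_range'] at h3
  rw [h3, h1, count_shrink]
  cases (List.range (s.toList.length - 1)).any (bonusAt s.toList) <;> simp

-- ================= B side =================

-- flipL cs i: the flipped list Source B builds (as a List.set).
def flipL (cs : List Char) (i : Nat) : List Char :=
  cs.set i (if cs.getD i ' ' = 'V' then 'K' else 'V')

theorem length_flipL (cs : List Char) (i : Nat) : (flipL cs i).length = cs.length := by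
  simp [flipL]

theorem port_flip_eq (cs : List Char) (i : Nat) (hi : i < cs.length) :
    cs.take i ++ [if cs.getD i ' ' == 'V' then 'K' else 'V'] ++ cs.drop (i+1) = flipL cs i := by
  rw [flipL, List.set_eq_take_cons_drop _ hi]
  by_cases hc : cs.getD i ' ' = 'V' <;> simp

theorem getD_flipL_ne (cs : List Char) (i j : Nat) (h : j ≠ i) :
    (flipL cs i).getD j ' ' = cs.getD j ' ' := by
  rw [flipL, List.getD_eq_getElem?_getD, List.getElem?_set_ne (by omega),
    ← List.getD_eq_getElem?_getD]

theorem getD_flipL_self (cs : List Char) (i : Nat) (hi : i < cs.length) :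
    (flipL cs i).getD i ' ' = (if cs.getD i ' ' = 'V' then 'K' else 'V') := by
  rw [flipL, List.getD_eq_getElem?_getD, List.getElem?_set_self',
    List.getElem?_eq_getElem hi]
  simp

theorem occB_flipL_ne (cs : List Char) (i j : Nat) (h1 : j ≠ i) (h2 : j + 1 ≠ i) :
    occB (flipL cs i) j = occB cs j := by
  unfold occB
  rw [length_flipL, getD_flipL_ne cs i j h1, getD_flipL_ne cs i (j+1) h2]

-- bCount as a countP of occB (the range bound makes occB's guard redundant).
theorem bCount_eq (cs : List Char) :
    bCount cs = (((List.range (cs.length - 1)).countP (occB cs) : Nat) : Int) := by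
  unfold bCount
  congr 1
  apply List.countP_congr
  intro j hj
  rw [List.mem_range] at hj
  simp only [occB]
  have : j + 1 < cs.length := by omega
  simp [this]

def d2 (p q : Nat → Bool) (x : Nat) : Int :=
  (if q x then 1 else 0) - (if p x then 1 else 0)

theorem countP_diff1 (p q : Nat → Bool) (a : Nat) (h : ∀ j, j ≠ a → p j = q j) (m : Nat) :
    (((List.range m).countP q : Nat) : Int) - (((List.range m).countP p : Nat) : Int)
      = if a < m then d2 p q a else 0 := by
  induction m with
  | zero => simp
  | succ m ih =>
    have eq : ∀ r : Nat → Bool, (List.range (m+1)).countP r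
        = (List.range m).countP r + (if r m then 1 else 0) := by
      intro r
      rw [List.range_succ, List.countP_append]
      by_cases hr : r m <;> simp [hr]
    rw [eq q, eq p]
    push_cast
    by_cases hma : m = a
    · subst hma
      rw [if_neg (lt_irrefl m)] at ih
      rw [if_pos (Nat.lt_succ_self m)]
      unfold d2
      by_cases hq : q m <;> by_cases hp : p m <;> simp [hq, hp] <;> omega
    · have hpq : p m = q m := h m hma
      rw [hpq]
      have hiff : a < m + 1 ↔ a < m := by omega
      by_cases ha : a < m
      · rw [if_pos ha] at ih
        rw [if_pos (hiff.mpr ha)]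
        linarith [ih]
      · rw [if_neg ha] at ih
        rw [if_neg (fun hh => ha (hiff.mp hh))]
        linarith [ih]

theorem countP_diff2 (p q : Nat → Bool) (a b : Nat) (hba : b < a)
    (h : ∀ j, j ≠ a → j ≠ b → p j = q j) (m : Nat) :
    (((List.range m).countP q : Nat) : Int) - (((List.range m).countP p : Nat) : Int)
      = (if a < m then d2 p q a else 0) + (if b < m then d2 p q b else 0) := by
  induction m with
  | zero => simp
  | succ m ih =>
    have eq : ∀ r : Nat → Bool, (List.range (m+1)).countP r
        = (List.range m).countP r + (if r m then 1 else 0) := by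
      intro r
      rw [List.range_succ, List.countP_append]
      by_cases hr : r m <;> simp [hr]
    rw [eq q, eq p]
    push_cast
    by_cases hma : m = a
    · subst hma
      rw [if_neg (lt_irrefl m)] at ih
      rw [if_pos (Nat.lt_succ_self m)]
      have hbm : b < m := hba
      have hbm1 : b < m + 1 := by omega
      rw [if_pos hbm] at ih
      rw [if_pos hbm1]
      have : (if q m then (1:Int) else 0) - (if p m then 1 else 0) = d2 p q m := by
        unfold d2; ring
      by_cases hq : q m <;> by_cases hp : p m <;> simp only [hq, hp, if_true,
        d2] at ih ⊢ <;> linarith [ih]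
    · by_cases hmb : m = b
      · subst hmb
        have ham : ¬ a < m := by omega
        rw [if_neg ham, if_neg (lt_irrefl m)] at ih
        have ham1 : ¬ a < m + 1 := by omega
        rw [if_neg ham1, if_pos (Nat.lt_succ_self m)]
        unfold d2
        by_cases hq : q m <;> by_cases hp : p m <;> simp only [hq, hp, if_true] at ih ⊢ <;>
          linarith [ih]
      · have hpq : p m = q m := h m hma hmb
        rw [hpq]
        have hiffa : a < m + 1 ↔ a < m := by omega
        have hiffb : b < m + 1 ↔ b < m := by omega
        by_cases ha : a < m <;> by_cases hb : b < m <;>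
          [rw [if_pos (hiffa.mpr ha), if_pos (hiffb.mpr hb)];
           rw [if_pos (hiffa.mpr ha), if_neg (fun hh => hb (hiffb.mp hh))];
           rw [if_neg (fun hh => ha (hiffa.mp hh)), if_pos (hiffb.mpr hb)];
           rw [if_neg (fun hh => ha (hiffa.mp hh)), if_neg (fun hh => hb (hiffb.mp hh))]] <;>
          [rw [if_pos ha, if_pos hb] at ih; rw [if_pos ha, if_neg hb] at ih;
           rw [if_neg ha, if_pos hb] at ih; rw [if_neg ha, if_neg hb] at ih] <;>
          linarith [ih]


theorem occB_spec (cs : List Char) (j : Nat) :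
    occB cs j = true ↔ j + 1 < cs.length ∧ cs.getD j ' ' = 'V' ∧ cs.getD (j+1) ' ' = 'K' := by
  simp [occB, and_assoc]

theorem occB_false_fst (cs : List Char) (j : Nat) (h : cs.getD j ' ' ≠ 'V') :
    occB cs j = false := by
  simp only [occB, Bool.and_eq_false_iff]; left; right; simpa using h

theorem occB_false_snd (cs : List Char) (j : Nat) (h : cs.getD (j+1) ' ' ≠ 'K') :
    occB cs j = false := by
  simp only [occB, Bool.and_eq_false_iff]; right; simpa using h

theorem pairedGe0_false (cs : List Char) (j : Nat) (h1 : occB cs j = false)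
    (h2 : occB cs (j-1) = false) : pairedGe cs 0 j = false := by
  simp [pairedGe, h1, h2]

theorem pairedGe0_fst (cs : List Char) (j : Nat) (hp : pairedGe cs 0 j = false) :
    occB cs j = false := by
  simp only [pairedGe, Bool.or_eq_false_iff, Bool.and_eq_false_iff,
    decide_eq_false_iff_not] at hp
  rcases hp.1 with h1 | h1
  · exact absurd (Nat.zero_le j) h1
  · exact h1

theorem pairedGe0_snd (cs : List Char) (j : Nat) (hj : 1 ≤ j) (hp : pairedGe cs 0 j = false) :
    occB cs (j-1) = false := by
  simp only [pairedGe, Bool.or_eq_false_iff, Bool.and_eq_false_iff,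
    decide_eq_false_iff_not] at hp
  rcases hp.2 with h1 | h1
  · exact absurd hj h1
  · exact h1

theorem d2_le_one (p q : Nat → Bool) (x : Nat) : d2 p q x ≤ 1 := by
  unfold d2; split_ifs <;> omega

theorem d2_nonpos (p q : Nat → Bool) (x : Nat) (hq : q x = false) : d2 p q x ≤ 0 := by
  unfold d2
  rw [hq]
  have h0 : (if (false = true) then (1:Int) else 0) = 0 := by simp
  rw [h0]
  split_ifs <;> omega

theorem getD_flipL_self_V (cs : List Char) (i : Nat) (hi : i < cs.length)
    (hc : cs.getD i ' ' = 'V') : (flipL cs i).getD i ' ' = 'K' := by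
  rw [getD_flipL_self cs i hi, if_pos hc]

theorem getD_flipL_self_K (cs : List Char) (i : Nat) (hi : i < cs.length)
    (hc : cs.getD i ' ' ≠ 'V') : (flipL cs i).getD i ' ' = 'V' := by
  rw [getD_flipL_self cs i hi, if_neg hc]

-- one flip never beats base + bonus
theorem flip_count_le (cs : List Char) (i : Nat) (hi : i < cs.length)
    (hvk : cs.getD i ' ' = 'V' ∨ cs.getD i ' ' = 'K') :
    (((List.range (cs.length - 1)).countP (occB (flipL cs i)) : Nat) : Int)
      ≤ (((List.range (cs.length - 1)).countP (occB cs) : Nat) : Int)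
        + (if (List.range (cs.length - 1)).any (bonusAt cs) then 1 else 0) := by
  have hocc : ∀ j, j ≠ i → j + 1 ≠ i → occB (flipL cs i) j = occB cs j := occB_flipL_ne cs i
  rcases Nat.eq_zero_or_pos i with hi0 | hip
  · subst hi0
    have hdiff := countP_diff1 (occB cs) (occB (flipL cs 0)) 0
      (fun j hj => (hocc j hj (by omega)).symm) (cs.length - 1)
    rcases hvk with hc | hc
    · have hq0 : occB (flipL cs 0) 0 = false :=
        occB_false_fst _ 0 (by rw [getD_flipL_self_V cs 0 hi hc]; decide)
      have hd := d2_nonpos (occB cs) (occB (flipL cs 0)) 0 hq0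
      have hb0 : (0:Int) ≤ if (List.range (cs.length-1)).any (bonusAt cs) then 1 else 0 := by
        split_ifs <;> omega
      split_ifs at hdiff <;> linarith
    · have hp0 : occB cs 0 = false := occB_false_fst _ 0 (by rw [hc]; decide)
      by_cases hb : (List.range (cs.length-1)).any (bonusAt cs) = true
      · rw [if_pos hb]
        have hd := d2_le_one (occB cs) (occB (flipL cs 0)) 0
        split_ifs at hdiff <;> linarith
      · rw [if_neg hb]
        have hnb : ∀ j, j < cs.length - 1 → bonusAt cs j = false := by
          intro j hj
          by_contra hcj
          rw [Bool.not_eq_false] at hcj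
          exact hb (List.any_eq_true.mpr ⟨j, List.mem_range.mpr hj, hcj⟩)
        have hd : (if 0 < cs.length - 1 then d2 (occB cs) (occB (flipL cs 0)) 0 else 0) ≤ 0 := by
          split_ifs with hm
          · by_cases hq0 : occB (flipL cs 0) 0 = true
            · exfalso
              obtain ⟨hb1, _, hb3⟩ := (occB_spec _ 0).mp hq0
              rw [length_flipL] at hb1
              rw [getD_flipL_ne cs 0 1 (by omega)] at hb3
              have hbon : bonusAt cs 0 = true := by
                apply (bonusAt_iff cs 0).mpr
                right
                refine ⟨hb1, hc, hb3, ?_, ?_⟩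
                · exact pairedGe0_false cs 0 hp0 (by simpa using hp0)
                · exact pairedGe0_false cs 1
                    (occB_false_fst cs 1 (by rw [hb3]; decide)) (by simpa using hp0)
              rw [hnb 0 hm] at hbon
              exact absurd hbon (by decide)
            · rw [Bool.not_eq_true] at hq0
              exact d2_nonpos _ _ 0 hq0
          · omega
        split_ifs at hdiff hd <;> linarith
  · rcases hvk with hc | hc
    · -- s[i] = 'V'
      have hqi : occB (flipL cs i) i = false :=
        occB_false_fst _ i (by rw [getD_flipL_self_V cs i hi hc]; decide)
      have hpp : occB cs (i-1) = false :=
        occB_false_snd _ (i-1) (by rw [(by omega : i-1+1 = i), hc]; decide)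
      have hdiff := countP_diff2 (occB cs) (occB (flipL cs i)) i (i-1) (by omega)
        (fun k h1 h2 => (hocc k h1 (by omega)).symm) (cs.length - 1)
      have hdi := d2_nonpos (occB cs) (occB (flipL cs i)) i hqi
      by_cases hb : (List.range (cs.length-1)).any (bonusAt cs) = true
      · rw [if_pos hb]
        have hd1 := d2_le_one (occB cs) (occB (flipL cs i)) (i-1)
        split_ifs at hdiff <;> linarith
      · rw [if_neg hb]
        have hnb : ∀ j, j < cs.length - 1 → bonusAt cs j = false := by
          intro j hj
          by_contra hcj
          rw [Bool.not_eq_false] at hcj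
          exact hb (List.any_eq_true.mpr ⟨j, List.mem_range.mpr hj, hcj⟩)
        by_cases hq1 : occB (flipL cs i) (i-1) = true
        · obtain ⟨hb1, hb2, _⟩ := (occB_spec _ (i-1)).mp hq1
          rw [length_flipL] at hb1
          rw [getD_flipL_ne cs i (i-1) (by omega)] at hb2
          by_cases hpi : occB cs i = true
          · have him : i < cs.length - 1 := by have := occB_lt cs i hpi; omega
            have e1 : d2 (occB cs) (occB (flipL cs i)) i = -1 := by
              simp [d2, hqi, hpi]
            have hd1 := d2_le_one (occB cs) (occB (flipL cs i)) (i-1)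
            rw [if_pos him, if_pos (by omega : i - 1 < cs.length - 1), e1] at hdiff
            linarith
          · exfalso
            rw [Bool.not_eq_true] at hpi
            have hbon : bonusAt cs (i-1) = true := by
              apply (bonusAt_iff cs (i-1)).mpr
              left
              refine ⟨by omega, hb2, ?_, ?_, ?_⟩
              · rw [(by omega : i-1+1 = i)]; exact hc
              · refine pairedGe0_false cs (i-1) hpp (occB_false_snd cs (i-1-1) ?_)
                by_cases h2i : 2 ≤ i
                · rw [(by omega : i-1-1+1 = i-1), hb2]; decide
                · rw [(by omega : i-1-1+1 = i), hc]; decide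
              · rw [(by omega : i-1+1 = i)]; exact pairedGe0_false cs i hpi hpp
            rw [hnb (i-1) (by omega)] at hbon
            exact absurd hbon (by decide)
        · rw [Bool.not_eq_true] at hq1
          have hd1 := d2_nonpos (occB cs) (occB (flipL cs i)) (i-1) hq1
          split_ifs at hdiff <;> linarith
    · -- s[i] = 'K'
      have hpi : occB cs i = false := occB_false_fst _ i (by rw [hc]; decide)
      have hqp : occB (flipL cs i) (i-1) = false :=
        occB_false_snd _ (i-1) (by
          rw [(by omega : i-1+1 = i), getD_flipL_self_K cs i hi (by rw [hc]; decide)]; decide)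
      have hdiff := countP_diff2 (occB cs) (occB (flipL cs i)) i (i-1) (by omega)
        (fun k h1 h2 => (hocc k h1 (by omega)).symm) (cs.length - 1)
      have hdp := d2_nonpos (occB cs) (occB (flipL cs i)) (i-1) hqp
      by_cases hb : (List.range (cs.length-1)).any (bonusAt cs) = true
      · rw [if_pos hb]
        have hd1 := d2_le_one (occB cs) (occB (flipL cs i)) i
        split_ifs at hdiff <;> linarith
      · rw [if_neg hb]
        have hnb : ∀ j, j < cs.length - 1 → bonusAt cs j = false := by
          intro j hj
          by_contra hcj
          rw [Bool.not_eq_false] at hcj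
          exact hb (List.any_eq_true.mpr ⟨j, List.mem_range.mpr hj, hcj⟩)
        by_cases hqi : occB (flipL cs i) i = true
        · obtain ⟨hb1, _, hb3⟩ := (occB_spec _ i).mp hqi
          rw [length_flipL] at hb1
          rw [getD_flipL_ne cs i (i+1) (by omega)] at hb3
          by_cases hppi : occB cs (i-1) = true
          · have e1 : d2 (occB cs) (occB (flipL cs i)) i = 1 := by
              simp [d2, hqi, hpi]
            have e2 : d2 (occB cs) (occB (flipL cs i)) (i-1) = -1 := by
              simp [d2, hqp, hppi]
            have him1 : i - 1 < cs.length - 1 := by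
              have := occB_lt cs (i-1) hppi; omega
            rw [if_pos (by omega : i < cs.length - 1), if_pos him1, e1, e2] at hdiff
            linarith
          · exfalso
            rw [Bool.not_eq_true] at hppi
            have hbon : bonusAt cs i = true := by
              apply (bonusAt_iff cs i).mpr
              right
              refine ⟨hb1, hc, hb3, ?_, ?_⟩
              · exact pairedGe0_false cs i hpi hppi
              · exact pairedGe0_false cs (i+1)
                  (occB_false_fst cs (i+1) (by rw [hb3]; decide)) (by simpa using hpi)
            rw [hnb i (by omega)] at hbon
            exact absurd hbon (by decide)
        · rw [Bool.not_eq_true] at hqi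
          have hd1 := d2_nonpos (occB cs) (occB (flipL cs i)) i hqi
          split_ifs at hdiff <;> linarith

-- when a bonus pair exists, some flip realizes base + 1
theorem bonus_flip (cs : List Char)
    (h : (List.range (cs.length - 1)).any (bonusAt cs) = true) :
    ∃ i, i < cs.length ∧ (cs.getD i ' ' = 'V' ∨ cs.getD i ' ' = 'K') ∧
      (((List.range (cs.length - 1)).countP (occB (flipL cs i)) : Nat) : Int)
        = (((List.range (cs.length - 1)).countP (occB cs) : Nat) : Int) + 1 := by
  obtain ⟨j, hjmem, hbj⟩ := List.any_eq_true.mp h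
  rw [List.mem_range] at hjmem
  rcases (bonusAt_iff cs j).mp hbj with ⟨hb1, hv1, hv2, hpg1, hpg2⟩ | ⟨hb1, hk1, hk2, hpg1, hpg2⟩
  · -- 'VV' at (j, j+1): flip position j+1
    refine ⟨j+1, hb1, Or.inl hv2, ?_⟩
    have hocc := occB_flipL_ne cs (j+1)
    have hdiff := countP_diff2 (occB cs) (occB (flipL cs (j+1))) (j+1) j (by omega)
      (fun k h1 h2 => (hocc k h1 (by omega)).symm) (cs.length - 1)
    have e1 : d2 (occB cs) (occB (flipL cs (j+1))) (j+1) = 0 := by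
      have hq : occB (flipL cs (j+1)) (j+1) = false :=
        occB_false_fst _ (j+1) (by rw [getD_flipL_self_V cs (j+1) hb1 hv2]; decide)
      have hp : occB cs (j+1) = false := pairedGe0_fst cs (j+1) hpg2
      simp [d2, hq, hp]
    have e2 : d2 (occB cs) (occB (flipL cs (j+1))) j = 1 := by
      have hq : occB (flipL cs (j+1)) j = true := by
        apply (occB_spec _ j).mpr
        refine ⟨by rw [length_flipL]; omega, ?_, ?_⟩
        · rw [getD_flipL_ne cs (j+1) j (by omega)]; exact hv1
        · exact getD_flipL_self_V cs (j+1) hb1 hv2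
      have hp : occB cs j = false := pairedGe0_fst cs j hpg1
      simp [d2, hq, hp]
    have t1 : (if j+1 < cs.length - 1 then d2 (occB cs) (occB (flipL cs (j+1))) (j+1) else 0)
        = 0 := by rw [e1]; simp
    rw [t1, if_pos hjmem, e2] at hdiff
    linarith
  · -- 'KK' at (j, j+1): flip position j
    refine ⟨j, by omega, Or.inr hk1, ?_⟩
    have hvK : cs.getD j ' ' ≠ 'V' := by rw [hk1]; decide
    have hq : occB (flipL cs j) j = true := by
      apply (occB_spec _ j).mpr
      refine ⟨by rw [length_flipL]; omega, getD_flipL_self_K cs j (by omega) hvK, ?_⟩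
      rw [getD_flipL_ne cs j (j+1) (by omega)]; exact hk2
    have hp : occB cs j = false := occB_false_fst cs j hvK
    rcases Nat.eq_zero_or_pos j with hj0 | hjp
    · subst hj0
      have hocc := occB_flipL_ne cs 0
      have hdiff := countP_diff1 (occB cs) (occB (flipL cs 0)) 0
        (fun k hk => (hocc k hk (by omega)).symm) (cs.length - 1)
      have e1 : d2 (occB cs) (occB (flipL cs 0)) 0 = 1 := by simp [d2, hq, hp]
      rw [if_pos hjmem, e1] at hdiff
      linarith
    · have hocc := occB_flipL_ne cs j
      have hdiff := countP_diff2 (occB cs) (occB (flipL cs j)) j (j-1) (by omega)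
        (fun k h1 h2 => (hocc k h1 (by omega)).symm) (cs.length - 1)
      have e1 : d2 (occB cs) (occB (flipL cs j)) j = 1 := by simp [d2, hq, hp]
      have e2 : d2 (occB cs) (occB (flipL cs j)) (j-1) = 0 := by
        have hq2 : occB (flipL cs j) (j-1) = false := by
          apply occB_false_snd
          rw [(by omega : j-1+1 = j), getD_flipL_self_K cs j (by omega) hvK]; decide
        have hp2 : occB cs (j-1) = false := pairedGe0_snd cs j hjp hpg1
        simp [d2, hq2, hp2]
      have t2 : (if j - 1 < cs.length - 1 then d2 (occB cs) (occB (flipL cs j)) (j-1) else 0)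
          = 0 := by rw [e2]; simp
      rw [t2, if_pos hjmem, e1] at hdiff
      linarith

-- fold lemmas for Source B's max-accumulating loop
theorem foldl_bStep_le (cs : List Char) (B : Int) :
    ∀ (l : List Nat) (a : Int), a ≤ B →
      (∀ i ∈ l, (cs.getD i ' ' == 'V' || cs.getD i ' ' == 'K') = true → bFlipCount cs i ≤ B) →
      l.foldl (bStep cs) a ≤ B := by
  intro l
  induction l with
  | nil => intro a ha _; simpa using ha
  | cons j t ih =>
    intro a ha hall
    rw [List.foldl_cons]
    apply ih
    · unfold bStep
      by_cases hcj : (cs.getD j ' ' == 'V' || cs.getD j ' ' == 'K') = true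
      · rw [if_pos hcj]
        have := hall j (by simp) hcj
        split_ifs <;> [exact this; exact ha]
      · rw [if_neg hcj]; exact ha
    · intro i hi hci
      exact hall i (by simp [hi]) hci

theorem le_foldl_bStep (cs : List Char) :
    ∀ (l : List Nat) (a : Int), a ≤ l.foldl (bStep cs) a := by
  intro l
  induction l with
  | nil => intro a; simp
  | cons j t ih =>
    intro a
    rw [List.foldl_cons]
    refine le_trans ?_ (ih (bStep cs a j))
    unfold bStep
    split_ifs <;> omega

theorem foldl_bStep_ge_elem (cs : List Char) :
    ∀ (l : List Nat) (a : Int) (i : Nat), i ∈ l →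
      (cs.getD i ' ' == 'V' || cs.getD i ' ' == 'K') = true →
      bFlipCount cs i ≤ l.foldl (bStep cs) a := by
  intro l
  induction l with
  | nil => intro a i hi; simp at hi
  | cons j t ih =>
    intro a i hi hci
    rw [List.foldl_cons]
    rcases List.mem_cons.mp hi with e | hit
    · subst e
      refine le_trans ?_ (le_foldl_bStep cs t (bStep cs a i))
      unfold bStep
      rw [if_pos hci]
      split_ifs <;> omega
    · exact ih (bStep cs a j) i hit hci

theorem bFlipCount_eq (cs : List Char) (i : Nat) (hi : i < cs.length) :
    bFlipCount cs i = (((List.range (cs.length - 1)).countP (occB (flipL cs i)) : Nat) : Int) := by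
  unfold bFlipCount
  rw [port_flip_eq cs i hi, bCount_eq, length_flipL]

-- B's value in the same closed form.
theorem funcB_val (s : String) :
    func_alt s = [(((List.range (s.toList.length - 1)).countP (occB s.toList) : Nat) : Int)
      + (if (List.range (s.toList.length - 1)).any (bonusAt s.toList) then 1 else 0)] := by
  unfold func_alt
  dsimp only
  congr 1
  apply le_antisymm
  · apply foldl_bStep_le
    · rw [bCount_eq]
      split_ifs <;> omega
    · intro i hi hci
      rw [List.mem_range] at hi
      rw [bFlipCount_eq s.toList i hi]
      apply flip_count_le s.toList i hi
      simpa using hci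
  · by_cases hb : (List.range (s.toList.length - 1)).any (bonusAt s.toList) = true
    · rw [if_pos hb]
      obtain ⟨i, hi, hvk, heq⟩ := bonus_flip s.toList hb
      have hci : (s.toList.getD i ' ' == 'V' || s.toList.getD i ' ' == 'K') = true := by
        simp only [Bool.or_eq_true, beq_iff_eq]
        exact hvk
      have hge := foldl_bStep_ge_elem s.toList (List.range s.toList.length)
        (bCount s.toList) i (List.mem_range.mpr hi) hci
      rw [bFlipCount_eq s.toList i hi, heq] at hge
      linarith
    · rw [if_neg hb]
      have hle := le_foldl_bStep s.toList (List.range s.toList.length) (bCount s.toList)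
      linarith [hle, bCount_eq s.toList]

-- ===== VERDICT (by name: the statement is the Claim_ definition above) =====
theorem func_spec : Claim_equal_func := by
  unfold Claim_equal_func
  intro s _
  unfold Spec_func
  rw [funcA_val, funcB_val]
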